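-- pv_equiv track=rewrite | github.com/ronaldoussoren/pyobjc | source-deps/py2app/examples/PyObjC/ICSharingWatcher/leases.py | leases
-- ===== SOURCE A (Python) =====
-- import itertools
--
-- def leases(lines):
--     lines = itertools.imap(lambda s:s.strip(), lines)
--     for line in lines:
--         if line == '{':
--             d = {}
--             for line in lines:
--                 if line == '}':
--                     yield d
--                     break
--                 if not line:
--                     continue
--                 k,v = line.split('=', 1)
--                 d[k] = v
-- ===== SOURCE B (Python) =====
-- def leases(lines):
--     current = None
--     for raw in lines:
--         line = raw.strip()
--         if current is None:
--             if line == '{':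
--                 current = {}
--         elif line == '}':
--             yield current
--             current = None
--         elif line:
--             k, v = line.split('=', 1)
--             current[k] = v
-- ===== Notes on version B (the rewrite author's own statement) =====
-- stated objective: idiomatic
-- what changed: Replaces the nested two-loop pattern draining one shared iterator with a single pass that keeps an explicit state variable (None outside a block, the dict being filled inside).
-- outside the precondition, e.g. on leases(['{', 'x']): A raises ValueError, B raises ValueError
import Mathlib
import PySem

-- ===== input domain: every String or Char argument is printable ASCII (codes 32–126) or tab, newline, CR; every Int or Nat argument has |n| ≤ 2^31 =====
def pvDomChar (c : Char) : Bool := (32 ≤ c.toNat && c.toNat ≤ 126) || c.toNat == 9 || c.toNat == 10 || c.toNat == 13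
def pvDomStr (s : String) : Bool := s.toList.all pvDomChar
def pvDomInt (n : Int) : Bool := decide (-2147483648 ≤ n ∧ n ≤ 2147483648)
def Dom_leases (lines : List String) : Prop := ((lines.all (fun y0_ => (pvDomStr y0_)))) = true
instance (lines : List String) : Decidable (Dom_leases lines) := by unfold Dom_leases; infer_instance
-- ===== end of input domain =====

-- B replaces A's nested two-loop pattern (both loops draining one shared iterator) with a
-- single pass keeping an explicit state (none outside a block, the dict being filled inside);
-- objective: more idiomatic, same cost.

-- ===== PORT A =====
-- shared primitive for Python's `k, v = line.split('=', 1)` (both sources contain this line);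
-- the fallback arm is the case where Python raises ValueError, which Pre_leases excludes.
def splitEq1 (l : String) : String × String :=
  match PySem.Str.splitMax? l "=" 1 with
  | some (k :: v :: _) => (k, v)
  | _ => (l, "")

mutual
-- the outer `for line in lines:` loop of A
def leasesOuter : List String → List (List (String × String))
  | [] => []
  | l :: rest => if l = "{" then leasesInner rest PySem.Dict.empty else leasesOuter rest
-- the inner `for line in lines:` loop of A, draining the same iterator, with dict d
def leasesInner : List String → PySem.Dict String String → List (List (String × String))
  | [], _ => []
  | l :: rest, d =>
    if l = "}" then d.items :: leasesOuter rest
    else if l = "" then leasesInner rest d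
    else leasesInner rest (d.insert (splitEq1 l).1 (splitEq1 l).2)
end

def leases (lines : List String) : List (List (String × String)) :=
  leasesOuter (lines.map PySem.Str.strip)

-- ===== PORT B =====
-- one step of B's single loop; state = (yielded so far, current dict or none)
def leasesStep (st : List (List (String × String)) × Option (PySem.Dict String String))
    (l : String) : List (List (String × String)) × Option (PySem.Dict String String) :=
  match st.2 with
  | none => if l = "{" then (st.1, some PySem.Dict.empty) else (st.1, none)
  | some d =>
    if l = "}" then (st.1 ++ [d.items], none)
    else if l = "" then (st.1, some d)
    else (st.1, some (d.insert (splitEq1 l).1 (splitEq1 l).2))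

def leases_alt (lines : List String) : List (List (String × String)) :=
  ((lines.map PySem.Str.strip).foldl leasesStep ([], none)).1

-- ===== PRECONDITION & SPEC =====
-- Pre_ excludes exactly the inputs where A raises ValueError: a non-empty stripped line inside
-- a block, other than '}', that contains no '='.
def preAux (inBlock : Bool) : List String → Bool
  | [] => true
  | l :: rest =>
    if inBlock then
      if l = "}" then preAux false rest
      else if l = "" then preAux true rest
      else l.toList.contains '=' && preAux true rest
    else preAux (l = "{") rest

def Pre_leases (lines : List String) : Prop :=
  preAux false (lines.map PySem.Str.strip) = true
instance (lines : List String) : Decidable (Pre_leases lines) := by unfold Pre_leases; infer_instance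

def pvWitness_leases : List String := ["{", "a=1", "", "}", "junk", "{", "}"]

def Spec_leases (lines : List String) (out : List (List (String × String))) : Prop := out = leases_alt lines
instance (lines : List String) (out : List (List (String × String))) : Decidable (Spec_leases lines out) := by unfold Spec_leases; infer_instance

-- ===== CLAIM (what is proved, stated in full; the proofs are below) =====
def Claim_equal_leases : Prop := ∀ (lines : List String), Dom_leases lines → Pre_leases lines → Spec_leases lines (leases lines)

-- ===== LEMMAS AND PROOFS =====

-- B's fold from either state equals A's corresponding loop, with the yielded prefix in front.
theorem leasesStep_foldl_spec (ls : List String) :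
    (∀ acc, (ls.foldl leasesStep (acc, none)).1 = acc ++ leasesOuter ls) ∧
    (∀ acc d, (ls.foldl leasesStep (acc, some d)).1 = acc ++ leasesInner ls d) := by
  induction ls with
  | nil => simp [leasesOuter, leasesInner]
  | cons l rest ih =>
    refine ⟨fun acc => ?_, fun acc d => ?_⟩
    · simp only [List.foldl, leasesStep, leasesOuter]
      split_ifs with h <;> simp [ih.1, ih.2]
    · simp only [List.foldl, leasesStep, leasesInner]
      split_ifs with h1 h2 <;> simp [ih.1, ih.2]

-- ===== VERDICT (by name: the statement is the Claim_ definition above) =====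
theorem leases_spec : Claim_equal_leases := by
  intro lines _ _
  unfold Spec_leases leases leases_alt
  rw [(leasesStep_foldl_spec (lines.map PySem.Str.strip)).1 []]
  simp
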